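-- pv_equiv track=rewrite | github.com/satyanarayan-rao/dSMF_for_SMThub | scripts/uncompress_almost_cigar.py | uncompress_almost_cigar
-- ===== SOURCE A (Python) =====
-- def uncompress_almost_cigar(almost_cigar):
--     from collections import defaultdict
--     num_dict = defaultdict(lambda : False)
--     for i in range(10):
--         num_dict[str(i)] = True
--     uncomp = []
--     num_found = False
--     rep_num = []
--     for c in almost_cigar:
--         if num_dict[c] == False:
--             if num_found == True:
--                 rep = int("".join(rep_num))
--                 uncomp.append(uncomp[-1]*(rep - 1)) # rep - 1 because the character has been pushed once already
--                 num_found = False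
--                 rep_num = []
--             uncomp.append(c)
--         else:
--             num_found = True
--             rep_num.append(c)
--     # handle the last instance - in case rep_num is not empty - then it has to be filled
--     if len(rep_num) > 0:
--         rep = int("".join(rep_num))
--         uncomp.append(uncomp[-1]*(rep - 1))
--         num_found = False
--         return "".join(uncomp)
--     else:
--         return "".join(uncomp)
-- ===== SOURCE B (Python) =====
-- def uncompress_almost_cigar(almost_cigar):
--     out = []
--     i, n = 0, len(almost_cigar)
--     while i < n:
--         c = almost_cigar[i]
--         if c.isdigit():
--             j = i
--             while j < n and almost_cigar[j].isdigit():
--                 j += 1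
--             rep = int(almost_cigar[i:j])
--             out.append(out[-1] * (rep - 1))
--             i = j
--         else:
--             out.append(c)
--             i += 1
--     return "".join(out)
-- ===== Notes on version B (the rewrite author's own statement) =====
-- stated objective: simpler
-- what changed: Replaces A's num_found flag machine with digit accumulation and a duplicated post-loop flush by a single index loop that consumes each maximal digit run in one step and expands it immediately.
import Mathlib
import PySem

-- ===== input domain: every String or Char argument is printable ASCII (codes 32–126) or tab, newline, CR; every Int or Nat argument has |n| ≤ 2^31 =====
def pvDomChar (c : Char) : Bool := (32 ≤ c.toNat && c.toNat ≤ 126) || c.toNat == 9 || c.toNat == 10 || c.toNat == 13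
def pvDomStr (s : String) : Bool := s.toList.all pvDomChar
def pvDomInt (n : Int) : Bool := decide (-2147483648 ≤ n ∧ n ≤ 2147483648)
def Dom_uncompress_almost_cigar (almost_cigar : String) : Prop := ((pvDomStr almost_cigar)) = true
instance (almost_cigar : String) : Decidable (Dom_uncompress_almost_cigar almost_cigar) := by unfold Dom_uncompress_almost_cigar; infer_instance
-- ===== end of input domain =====

-- B replaces A's digit-accumulation flag machine (and its duplicated post-loop flush) by an
-- index loop that consumes each maximal digit run in one step (objective: simpler).
-- Python's s1 * n (n copies of s1, empty for n ≤ 0):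
def pvStrMul (s : List Char) (n : Int) : List Char := (List.replicate n.toNat s).flatten

-- ===== PORT A =====
-- A's loop state: (uncomp, num_found, rep_num); num_dict[c] == True exactly for '0'..'9' (= Char.isDigit).
-- uncomp[-1] on an empty uncomp raises IndexError in Python (excluded by Pre_); the port defaults to [] there.
def pvAStep (st : List (List Char) × Bool × List Char) (c : Char) : List (List Char) × Bool × List Char :=
  if c.isDigit = false then
    let uncomp :=
      if st.2.1 = true then
        let rep := (PySem.Int.ofChars? st.2.2).getD 0
        st.1 ++ [pvStrMul ((st.1.getLast?).getD []) (rep - 1)]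
      else st.1
    (uncomp ++ [[c]], false, [])
  else (st.1, true, st.2.2 ++ [c])

def uncompress_almost_cigar (almost_cigar : String) : String :=
  let st := almost_cigar.toList.foldl pvAStep ([], false, [])
  if st.2.2.length > 0 then
    let rep := (PySem.Int.ofChars? st.2.2).getD 0
    String.mk (st.1 ++ [pvStrMul ((st.1.getLast?).getD []) (rep - 1)]).flatten
  else
    String.mk st.1.flatten

-- ===== PORT B =====
-- B's while loop: each step consumes one non-digit char or one maximal digit run.
def pvBGo (out : List (List Char)) : List Char → List (List Char)
  | [] => out
  | c :: rest =>
    if c.isDigit then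
      let ds := c :: rest.takeWhile Char.isDigit
      let rest' := rest.dropWhile Char.isDigit
      let rep := (PySem.Int.ofChars? ds).getD 0
      pvBGo (out ++ [pvStrMul ((out.getLast?).getD []) (rep - 1)]) rest'
    else
      pvBGo (out ++ [[c]]) rest
termination_by l => l.length
decreasing_by
  · simpa [Nat.lt_succ_iff] using List.length_dropWhile_le Char.isDigit rest
  · simp

def uncompress_almost_cigar_alt (almost_cigar : String) : String :=
  String.mk (pvBGo [] almost_cigar.toList).flatten

-- ===== PRECONDITION & SPEC =====
-- Pre_ excludes exactly the inputs where A raises IndexError (uncomp[-1] on an empty list):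
-- those whose first character is a digit, so a repeat count precedes any character to repeat.
def Pre_uncompress_almost_cigar (almost_cigar : String) : Prop :=
  (match almost_cigar.toList with
   | [] => true
   | c :: _ => !c.isDigit) = true
instance (almost_cigar : String) : Decidable (Pre_uncompress_almost_cigar almost_cigar) := by unfold Pre_uncompress_almost_cigar; infer_instance
def pvWitness_uncompress_almost_cigar : String := "M3I2D"
def Spec_uncompress_almost_cigar (almost_cigar : String) (out : String) : Prop := out = uncompress_almost_cigar_alt almost_cigar
instance (almost_cigar : String) (out : String) : Decidable (Spec_uncompress_almost_cigar almost_cigar out) := by unfold Spec_uncompress_almost_cigar; infer_instance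

-- ===== CLAIM (what is proved, stated in full; the proofs are below) =====
def Claim_equal_uncompress_almost_cigar : Prop := ∀ (almost_cigar : String), Dom_uncompress_almost_cigar almost_cigar → Pre_uncompress_almost_cigar almost_cigar → Spec_uncompress_almost_cigar almost_cigar (uncompress_almost_cigar almost_cigar)

-- ===== LEMMAS AND PROOFS =====

-- A's post-loop flush, as a function of the final state.
def pvAPost (st : List (List Char) × Bool × List Char) : List (List Char) :=
  if st.2.2.length > 0 then
    let rep := (PySem.Int.ofChars? st.2.2).getD 0
    st.1 ++ [pvStrMul ((st.1.getLast?).getD []) (rep - 1)]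
  else st.1

lemma pvA_eq_post (s : String) :
    uncompress_almost_cigar s = String.mk (pvAPost (s.toList.foldl pvAStep ([], false, []))).flatten := by
  simp only [uncompress_almost_cigar, pvAPost]
  split <;> rfl

-- Feeding a run of digits from a clean-flag state just accumulates them.
lemma pvA_digits (ds : List Char) (h : ∀ c ∈ ds, c.isDigit = true) (out : List (List Char))
    (nf : Bool) (acc : List Char) :
    ds.foldl pvAStep (out, nf, acc) = (out, if ds = [] then nf else true, acc ++ ds) := by
  induction ds generalizing nf acc with
  | nil => simp
  | cons d tl ih =>
    have hd : d.isDigit = true := h d (by simp)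
    rw [List.foldl_cons, show pvAStep (out, nf, acc) d = (out, true, acc ++ [d]) by
      simp [pvAStep, hd]]
    rw [ih (fun c hc => h c (by simp [hc])) true (acc ++ [d])]
    simp

-- Main invariant: from a clean-flag state, A's loop+flush equals B's run loop.
lemma pvMain (cs : List Char) (out : List (List Char)) :
    pvAPost (cs.foldl pvAStep (out, false, [])) = pvBGo out cs := by
  induction out, cs using pvBGo.induct with
  | case1 out => simp [pvAPost, pvBGo]
  | case2 out c rest hc ds rest' rep ih =>
    simp only [ds, rest', rep] at ih ⊢
    -- maximal digit run c :: takeWhile, then dropWhile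
    have hds : ∀ x ∈ c :: rest.takeWhile Char.isDigit, x.isDigit = true := by
      intro x hx
      rcases List.mem_cons.mp hx with h | h
      · simpa [h] using hc
      · exact List.mem_takeWhile_imp h
    have hfold : (c :: rest).foldl pvAStep (out, false, []) =
        (rest.dropWhile Char.isDigit).foldl pvAStep
          (out, true, c :: rest.takeWhile Char.isDigit) := by
      conv_lhs => rw [show c :: rest = (c :: rest.takeWhile Char.isDigit) ++ rest.dropWhile Char.isDigit by
        rw [List.cons_append, List.takeWhile_append_dropWhile]]
      rw [List.foldl_append, pvA_digits _ hds]
      simp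
    rw [hfold]
    rw [show pvBGo out (c :: rest) =
        pvBGo (out ++ [pvStrMul ((out.getLast?).getD [])
          (((PySem.Int.ofChars? (c :: rest.takeWhile Char.isDigit)).getD 0) - 1)])
          (rest.dropWhile Char.isDigit) by rw [pvBGo]; simp [hc]]
    -- case on the remainder
    cases hrest : rest.dropWhile Char.isDigit with
    | nil =>
      simp [pvAPost, pvBGo] at ih ⊢
    | cons d tl =>
      have hd : d.isDigit = false := by
        have := List.head?_dropWhile_not Char.isDigit rest
        rw [hrest] at this
        simpa using this
      rw [List.foldl_cons,
        show pvAStep (out, true, c :: rest.takeWhile Char.isDigit) d =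
          (out ++ [pvStrMul ((out.getLast?).getD [])
            (((PySem.Int.ofChars? (c :: rest.takeWhile Char.isDigit)).getD 0) - 1)] ++ [[d]],
           false, []) by simp [pvAStep, hd]]
      rw [hrest] at ih
      rw [List.foldl_cons,
        show pvAStep (out ++ [pvStrMul ((out.getLast?).getD [])
            (((PySem.Int.ofChars? (c :: rest.takeWhile Char.isDigit)).getD 0) - 1)], false, []) d =
          (out ++ [pvStrMul ((out.getLast?).getD [])
            (((PySem.Int.ofChars? (c :: rest.takeWhile Char.isDigit)).getD 0) - 1)] ++ [[d]],
           false, []) by simp [pvAStep, hd]] at ih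
      rw [ih, pvBGo]
  | case3 out c rest hc ih =>
    have hcf : c.isDigit = false := by simpa using hc
    rw [List.foldl_cons,
      show pvAStep (out, false, []) c = (out ++ [[c]], false, []) by simp [pvAStep, hcf],
      ih, pvBGo]
    simp [hcf]

-- ===== VERDICT (by name: the statement is the Claim_ definition above) =====
theorem uncompress_almost_cigar_spec : Claim_equal_uncompress_almost_cigar := by
  intro s _ _
  unfold Spec_uncompress_almost_cigar uncompress_almost_cigar_alt
  rw [pvA_eq_post, pvMain]
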